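-- pv_equiv track=rewrite | github.com/vincent1995/exercise | programming_perls/chapter_3.py | InterpretText
-- ===== SOURCE A (Python) =====
-- def InterpretText(ts,args):
--     t = []
--     cur = 0
--     getArg = False
--     argNum = 0
--     escape = False
--     while(cur<len(ts)):
--         c = ts[cur]
--         if getArg:
--             if ord(c) in range(ord('0'),ord('9')+1):
--                 argNum = argNum*10 + ord(c)-ord('0')
--             else:
--                 t.append(args[argNum])
--                 t.append(c)
--                 argNum = 0
--                 getArg = False
--         elif escape:
--             t.append(c)
--             escape = False
--         elif c == '\\':
--             escape = True
--         elif c == "$":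
--             getArg = True
--         else:
--             t.append(c)
--         cur+=1
--     return ''.join(t)
-- ===== SOURCE B (Python) =====
-- def InterpretText(ts, args):
--     # Index-walking parser: explicit cursor, no persistent state flags.
--     out = []
--     i = 0
--     n = len(ts)
--     while i < n:
--         c = ts[i]
--         i += 1
--         if c == '\\':
--             if i < n:
--                 out.append(ts[i])
--                 i += 1
--         elif c == '$':
--             num = 0
--             while i < n and '0' <= ts[i] <= '9':
--                 num = num * 10 + ord(ts[i]) - ord('0')
--                 i += 1
--             if i < n:
--                 out.append(args[num])
--                 out.append(ts[i])
--                 i += 1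
--         else:
--             out.append(c)
--     return ''.join(out)
-- ===== Notes on version B (the rewrite author's own statement) =====
-- stated objective: simpler
-- what changed: Replaced A's single-pass state machine with persistent getArg/escape/argNum flags by a cursor-walking parser: each construct ('\x', '$digits t', plain char) is consumed in one local step (an inner digit loop for '$'), with no cross-iteration flag state.
import Mathlib
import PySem

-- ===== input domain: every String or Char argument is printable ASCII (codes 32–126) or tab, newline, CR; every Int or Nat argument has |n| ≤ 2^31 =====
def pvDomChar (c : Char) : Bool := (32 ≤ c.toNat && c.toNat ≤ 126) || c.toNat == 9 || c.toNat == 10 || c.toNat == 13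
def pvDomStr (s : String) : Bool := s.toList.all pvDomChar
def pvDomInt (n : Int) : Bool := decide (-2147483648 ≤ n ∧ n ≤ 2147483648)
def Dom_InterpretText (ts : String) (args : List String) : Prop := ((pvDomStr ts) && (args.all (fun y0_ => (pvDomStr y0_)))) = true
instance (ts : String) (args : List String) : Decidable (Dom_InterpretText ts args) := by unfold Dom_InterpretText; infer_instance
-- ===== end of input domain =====

-- B replaces A's flag-based state machine by a cursor-walking parser that consumes
-- each construct ('\x', '$digits t', plain char) in one local step (objective: simpler).


-- ===== PORT A =====
-- one loop iteration of A: state = (t, getArg, argNum, escape).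
-- Python's args[argNum] raises IndexError when argNum ≥ len(args); Pre_ excludes
-- exactly those inputs, so getD's default "" is never reached inside Pre_.
def pvStepA (args : List String) (st : List String × Bool × Nat × Bool) (c : Char) :
    List String × Bool × Nat × Bool :=
  match st with
  | (t, getArg, argNum, escape) =>
    if getArg then
      if '0' ≤ c ∧ c ≤ '9' then (t, true, argNum * 10 + (c.toNat - '0'.toNat), escape)
      else (t ++ [args.getD argNum "", String.singleton c], false, 0, escape)
    else if escape then (t ++ [String.singleton c], getArg, argNum, false)
    else if c = '\\' then (t, getArg, argNum, true)
    else if c = '$' then (t, true, argNum, escape)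
    else (t ++ [String.singleton c], getArg, argNum, escape)

def InterpretText (ts : String) (args : List String) : String :=
  String.join (ts.toList.foldl (pvStepA args) ([], false, 0, false)).1

-- ===== PORT B =====
-- inner digit loop of B: consume leading digits into num, return (num, rest).
def pvDigits : List Char → Nat → Nat × List Char
  | [], n => (n, [])
  | c :: rest, n =>
    if '0' ≤ c ∧ c ≤ '9' then pvDigits rest (n * 10 + (c.toNat - '0'.toNat))
    else (n, c :: rest)

theorem pvDigits_len : ∀ (l : List Char) (n : Nat), (pvDigits l n).2.length ≤ l.length := by
  intro l
  induction l with
  | nil => intro n; simp [pvDigits]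
  | cons c rest ih =>
    intro n
    simp only [pvDigits]
    split
    · exact Nat.le_trans (ih _) (Nat.le_succ _)
    · simp

-- B's cursor walk over the remaining characters, emitting the output pieces.
def pvGoB (args : List String) : List Char → List String
  | [] => []
  | c :: rest =>
    if c = '\\' then
      match rest with
      | [] => []
      | d :: r => String.singleton d :: pvGoB args r
    else if c = '$' then
      match h : pvDigits rest 0 with
      | (_, []) => []
      | (num, d :: r) => args.getD num "" :: String.singleton d :: pvGoB args r
    else String.singleton c :: pvGoB args rest
termination_by l => l.length
decreasing_by
  · simp
  · have := pvDigits_len rest 0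
    rw [h] at this
    simp at this
    simp
    omega
  · simp

def InterpretText_alt (ts : String) (args : List String) : String :=
  String.join (pvGoB args ts.toList)

-- ===== PRECONDITION & SPEC =====
-- the argument numbers referenced by ts: '\' skips the next char, '$' starts a
-- digit run whose value is referenced only if a terminating char follows.
def pvRefs : List Char → Option Nat → List Nat
  | [], _ => []
  | c :: rest, some n =>
    if '0' ≤ c ∧ c ≤ '9' then pvRefs rest (some (n * 10 + (c.toNat - '0'.toNat)))
    else n :: pvRefs rest none
  | c :: rest, none =>
    if c = '\\' then
      match rest with
      | [] => []
      | _ :: r => pvRefs r none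
    else if c = '$' then pvRefs rest (some 0)
    else pvRefs rest none

-- Pre_ excludes exactly the inputs on which the Python A raises IndexError
-- (some completed '$N' reference with N ≥ len(args)); B raises there as well.
def Pre_InterpretText (ts : String) (args : List String) : Prop :=
  ∀ n ∈ pvRefs ts.toList none, n < args.length
instance (ts : String) (args : List String) : Decidable (Pre_InterpretText ts args) := by
  unfold Pre_InterpretText; infer_instance

def pvWitness_InterpretText : String × List String := ("$0x", ["A"])

def Spec_InterpretText (ts : String) (args : List String) (out : String) : Prop := out = InterpretText_alt ts args
instance (ts : String) (args : List String) (out : String) : Decidable (Spec_InterpretText ts args out) := by unfold Spec_InterpretText; infer_instance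

-- ===== CLAIM (what is proved, stated in full; the proofs are below) =====
def Claim_equal_InterpretText : Prop := ∀ (ts : String) (args : List String), Dom_InterpretText ts args → Pre_InterpretText ts args → Spec_InterpretText ts args (InterpretText ts args)

-- ===== LEMMAS AND PROOFS =====

theorem pvGoB_nil (args : List String) : pvGoB args [] = [] := by rw [pvGoB.eq_def]

theorem pvGoB_bs (args : List String) (rest : List Char) :
    pvGoB args ('\\' :: rest) = match rest with
      | [] => [] | d :: r => String.singleton d :: pvGoB args r := by
  rw [pvGoB.eq_def]; simp

theorem pvGoB_dollar (args : List String) (rest : List Char) :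
    pvGoB args ('$' :: rest) = match pvDigits rest 0 with
      | (_, []) => [] | (num, d :: r) => args.getD num "" :: String.singleton d :: pvGoB args r := by
  rw [pvGoB.eq_def]; simp
  rcases pvDigits rest 0 with ⟨num, r⟩
  cases r <;> simp

theorem pvGoB_other (args : List String) (c : Char) (rest : List Char)
    (hb : c ≠ '\\') (hd : c ≠ '$') :
    pvGoB args (c :: rest) = String.singleton c :: pvGoB args rest := by
  rw [pvGoB.eq_def]; simp [hb, hd]

-- pieces B produces when the cursor stands inside a digit run with accumulator n
-- (the analogue of A's getArg state).
def pvGoArg (args : List String) (l : List Char) (n : Nat) : List String :=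
  match pvDigits l n with
  | (_, []) => []
  | (num, d :: r) => args.getD num "" :: String.singleton d :: pvGoB args r

-- fold invariant: A's fold from each reachable state = accumulated pieces ++ B's pieces.
theorem pvFold_inv (args : List String) :
    ∀ (l : List Char),
      (∀ t, (l.foldl (pvStepA args) (t, false, 0, false)).1 = t ++ pvGoB args l) ∧
      (∀ t, (l.foldl (pvStepA args) (t, false, 0, true)).1 =
        t ++ (match l with | [] => [] | d :: r => String.singleton d :: pvGoB args r)) ∧
      (∀ t n, (l.foldl (pvStepA args) (t, true, n, false)).1 = t ++ pvGoArg args l n) := by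
  intro l
  induction l with
  | nil => exact ⟨fun t => by simp [pvGoB_nil], fun t => by simp,
      fun t n => by simp [pvGoArg, pvDigits]⟩
  | cons c rest ih =>
    obtain ⟨ih1, ih2, ih3⟩ := ih
    refine ⟨?_, ?_, ?_⟩
    · intro t
      by_cases hb : c = '\\'
      · subst hb
        have hstep : pvStepA args (t, false, 0, false) '\\' = (t, false, 0, true) := by
          simp [pvStepA]
        rw [List.foldl_cons, hstep, pvGoB_bs]
        rcases rest with _ | ⟨d, r⟩
        · simp
        · simpa using ih2 t
      · by_cases hd : c = '$'
        · subst hd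
          have hstep : pvStepA args (t, false, 0, false) '$' = (t, true, 0, false) := by
            simp [pvStepA]
          rw [List.foldl_cons, hstep, pvGoB_dollar, ih3 t 0, pvGoArg]
        · have hstep : pvStepA args (t, false, 0, false) c =
              (t ++ [String.singleton c], false, 0, false) := by
            simp [pvStepA, hb, hd]
          rw [List.foldl_cons, hstep, ih1, pvGoB_other args c rest hb hd]
          simp
    · intro t
      have hstep : pvStepA args (t, false, 0, true) c =
          (t ++ [String.singleton c], false, 0, false) := by
        simp [pvStepA]
      rw [List.foldl_cons, hstep, ih1]
      simp
    · intro t n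
      by_cases h9 : '0' ≤ c ∧ c ≤ '9'
      · have hstep : pvStepA args (t, true, n, false) c =
            (t, true, n * 10 + (c.toNat - '0'.toNat), false) := by
          simp [pvStepA, h9]
        rw [List.foldl_cons, hstep, ih3]
        simp [pvGoArg, pvDigits, h9]
      · have hstep : pvStepA args (t, true, n, false) c =
            (t ++ [args.getD n "", String.singleton c], false, 0, false) := by
          simp [pvStepA, h9]
        rw [List.foldl_cons, hstep, ih1]
        simp [pvGoArg, pvDigits, h9]

-- ===== VERDICT (by name: the statement is the Claim_ definition above) =====
theorem InterpretText_spec : Claim_equal_InterpretText := by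
  intro ts args _ _
  unfold Spec_InterpretText InterpretText InterpretText_alt
  rw [(pvFold_inv args ts.toList).1 []]
  simp
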